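-- pv_equiv track=rewrite | github.com/bhupenderkumar/solana-trading-bot | backend/app/agents/market_data_agent.py | _detect_coins
-- ===== SOURCE A (Python) =====
-- def _detect_coins(message: str) -> list:
--     """Detect coin symbols from message."""
--     message_lower = message.lower()
--     coin_map = {
--         "sol": "SOL", "solana": "SOL",
--         "btc": "BTC", "bitcoin": "BTC",
--         "eth": "ETH", "ethereum": "ETH",
--         "doge": "DOGE", "dogecoin": "DOGE",
--         "xrp": "XRP", "ripple": "XRP",
--         "bonk": "BONK",
--         "wif": "WIF", "dogwifhat": "WIF",
--         "pepe": "PEPE"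
--     }
--
--     coins = []
--     for pattern, coin in coin_map.items():
--         if pattern in message_lower and coin not in coins:
--             coins.append(coin)
--
--     return coins
-- ===== SOURCE B (Python) =====
-- def _detect_coins(message: str) -> list:
--     """Detect coin symbols from message."""
--     aliases = {
--         "SOL": ["sol", "solana"],
--         "BTC": ["btc", "bitcoin"],
--         "ETH": ["eth", "ethereum"],
--         "DOGE": ["doge", "dogecoin"],
--         "XRP": ["xrp", "ripple"],
--         "BONK": ["bonk"],
--         "WIF": ["wif", "dogwifhat"],
--         "PEPE": ["pepe"],
--     }
--     message_lower = message.lower()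
--     return [coin for coin, names in aliases.items()
--             if any(name in message_lower for name in names)]
-- ===== Notes on version B (the rewrite author's own statement) =====
-- stated objective: idiomatic
-- what changed: B replaces A's alias-to-symbol dict loop with its accumulator-membership dedup by a symbol-to-aliases grouping traversed once as a comprehension with any(), so each symbol is considered exactly once and the duplicate check on the result list disappears.
import Mathlib
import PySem

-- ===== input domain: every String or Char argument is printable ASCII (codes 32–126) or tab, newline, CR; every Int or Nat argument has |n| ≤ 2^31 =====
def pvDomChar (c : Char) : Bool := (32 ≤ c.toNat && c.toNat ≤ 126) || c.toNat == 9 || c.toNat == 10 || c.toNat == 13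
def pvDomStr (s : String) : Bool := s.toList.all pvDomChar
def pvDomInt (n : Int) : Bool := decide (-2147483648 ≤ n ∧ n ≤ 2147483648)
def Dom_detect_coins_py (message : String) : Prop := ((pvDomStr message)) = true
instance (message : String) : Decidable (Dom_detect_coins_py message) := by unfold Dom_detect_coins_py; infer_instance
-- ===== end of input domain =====

-- B groups the aliases by symbol and emits each symbol at most once via any(), removing A's 'coin not in coins' dedup scan (idiomatic; same asymptotic cost).

-- ===== PORT A =====
def detect_coins_py (message : String) : List String :=
  let message_lower := PySem.Str.lower message
  let coin_map : PySem.Dict String String := PySem.Dict.ofList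
    [("sol", "SOL"), ("solana", "SOL"),
     ("btc", "BTC"), ("bitcoin", "BTC"),
     ("eth", "ETH"), ("ethereum", "ETH"),
     ("doge", "DOGE"), ("dogecoin", "DOGE"),
     ("xrp", "XRP"), ("ripple", "XRP"),
     ("bonk", "BONK"),
     ("wif", "WIF"), ("dogwifhat", "WIF"),
     ("pepe", "PEPE")]
  coin_map.items.foldl
    (fun coins pc =>
      if PySem.Str.isIn pc.1 message_lower && !(coins.contains pc.2) then
        coins ++ [pc.2]
      else coins)
    []

-- ===== PORT B =====
def detect_coins_py_alt (message : String) : List String :=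
  let aliases : PySem.Dict String (List String) := PySem.Dict.ofList
    [("SOL", ["sol", "solana"]),
     ("BTC", ["btc", "bitcoin"]),
     ("ETH", ["eth", "ethereum"]),
     ("DOGE", ["doge", "dogecoin"]),
     ("XRP", ["xrp", "ripple"]),
     ("BONK", ["bonk"]),
     ("WIF", ["wif", "dogwifhat"]),
     ("PEPE", ["pepe"])]
  let message_lower := PySem.Str.lower message
  (aliases.items.filter
    (fun g => g.2.any (fun name => PySem.Str.isIn name message_lower))).map (·.1)

-- ===== PRECONDITION & SPEC =====
def Spec_detect_coins_py (message : String) (out : List String) : Prop := out = detect_coins_py_alt message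
instance (message : String) (out : List String) : Decidable (Spec_detect_coins_py message out) := by unfold Spec_detect_coins_py; infer_instance

-- ===== CLAIM (what is proved, stated in full; the proofs are below) =====
def Claim_equal_detect_coins_py : Prop := ∀ (message : String), Dom_detect_coins_py message → Spec_detect_coins_py message (detect_coins_py message)

-- ===== LEMMAS AND PROOFS =====

-- A's loop body, with the substring test abstracted as t
def pvStep (t : String → Bool) (coins : List String) (pc : String × String) : List String :=
  if t pc.1 && !(coins.contains pc.2) then coins ++ [pc.2] else coins

-- flatten B's symbol → aliases groups into A's (alias, symbol) pair list
def pvFlat (groups : List (String × List String)) : List (String × String) :=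
  groups.flatMap (fun g => g.2.map (fun p => (p, g.1)))

-- once a coin is in the accumulator, its remaining aliases change nothing
theorem pvGroup_skip (t : String → Bool) (c : String) (coins : List String)
    (h : c ∈ coins) (aliases : List String) :
    (aliases.map (fun p => (p, c))).foldl (pvStep t) coins = coins := by
  induction aliases with
  | nil => rfl
  | cons p rest ih => simp [pvStep, h, ih]

-- processing one group appends its coin iff some alias tests true
theorem pvGroup_run (t : String → Bool) (c : String) (coins : List String)
    (h : c ∉ coins) (aliases : List String) :
    (aliases.map (fun p => (p, c))).foldl (pvStep t) coins
      = if aliases.any t then coins ++ [c] else coins := by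
  induction aliases with
  | nil => rfl
  | cons p rest ih =>
    rw [List.map_cons, List.foldl_cons]
    by_cases hp : t p = true
    · have hstep : pvStep t coins (p, c) = coins ++ [c] := by simp [pvStep, hp, h]
      rw [hstep, pvGroup_skip t c (coins ++ [c]) (by simp) rest]
      simp [hp]
    · simp only [Bool.not_eq_true] at hp
      have hstep : pvStep t coins (p, c) = coins := by simp [pvStep, hp]
      rw [hstep, ih]
      simp [hp]

-- A's fold over the flattened groups is the accumulator plus B's filtered symbols
theorem pvMain (t : String → Bool) (groups : List (String × List String)) (coins : List String)
    (hfresh : ∀ g ∈ groups, g.1 ∉ coins)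
    (hnodup : (groups.map (·.1)).Nodup) :
    (pvFlat groups).foldl (pvStep t) coins
      = coins ++ (groups.filter (fun g => g.2.any t)).map (·.1) := by
  induction groups generalizing coins with
  | nil => simp [pvFlat]
  | cons g rest ih =>
    have hflat : pvFlat (g :: rest) = g.2.map (fun p => (p, g.1)) ++ pvFlat rest := by
      simp [pvFlat]
    have hg : g.1 ∉ coins := hfresh g (by simp)
    rw [List.map_cons] at hnodup
    obtain ⟨h1, hnd⟩ := List.nodup_cons.mp hnodup
    have hne : ∀ g' ∈ rest, g'.1 ≠ g.1 := by
      intro g' hg' heq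
      exact h1 (heq ▸ List.mem_map_of_mem hg')
    rw [hflat, List.foldl_append, pvGroup_run t g.1 coins hg g.2]
    by_cases hany : g.2.any t = true
    · have hfresh' : ∀ g' ∈ rest, g'.1 ∉ coins ++ [g.1] := by
        intro g' hg'
        have ha := hfresh g' (List.mem_cons_of_mem _ hg')
        have hb := hne g' hg'
        simp [ha, hb]
      rw [if_pos hany, ih (coins ++ [g.1]) hfresh' hnd]
      simp [hany, List.append_assoc]
    · have hfresh' : ∀ g' ∈ rest, g'.1 ∉ coins := fun g' hg' =>
        hfresh g' (List.mem_cons_of_mem _ hg')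
      rw [if_neg hany, ih coins hfresh' hnd]
      simp [hany]

theorem detect_coins_py_spec : Claim_equal_detect_coins_py := by
  intro message _
  unfold Spec_detect_coins_py
  simp only [detect_coins_py, detect_coins_py_alt]
  rw [show (PySem.Dict.ofList
      [("sol", "SOL"), ("solana", "SOL"), ("btc", "BTC"), ("bitcoin", "BTC"),
       ("eth", "ETH"), ("ethereum", "ETH"), ("doge", "DOGE"), ("dogecoin", "DOGE"),
       ("xrp", "XRP"), ("ripple", "XRP"), ("bonk", "BONK"),
       ("wif", "WIF"), ("dogwifhat", "WIF"), ("pepe", "PEPE")] : PySem.Dict String String).items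
    = pvFlat [("SOL", ["sol", "solana"]), ("BTC", ["btc", "bitcoin"]), ("ETH", ["eth", "ethereum"]),
       ("DOGE", ["doge", "dogecoin"]), ("XRP", ["xrp", "ripple"]), ("BONK", ["bonk"]),
       ("WIF", ["wif", "dogwifhat"]), ("PEPE", ["pepe"])] from rfl,
    show (PySem.Dict.ofList
      [("SOL", ["sol", "solana"]), ("BTC", ["btc", "bitcoin"]), ("ETH", ["eth", "ethereum"]),
       ("DOGE", ["doge", "dogecoin"]), ("XRP", ["xrp", "ripple"]), ("BONK", ["bonk"]),
       ("WIF", ["wif", "dogwifhat"]), ("PEPE", ["pepe"])] : PySem.Dict String (List String)).items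
    = [("SOL", ["sol", "solana"]), ("BTC", ["btc", "bitcoin"]), ("ETH", ["eth", "ethereum"]),
       ("DOGE", ["doge", "dogecoin"]), ("XRP", ["xrp", "ripple"]), ("BONK", ["bonk"]),
       ("WIF", ["wif", "dogwifhat"]), ("PEPE", ["pepe"])] from rfl]
  exact pvMain (fun p => PySem.Str.isIn p (PySem.Str.lower message))
    [("SOL", ["sol", "solana"]), ("BTC", ["btc", "bitcoin"]), ("ETH", ["eth", "ethereum"]),
     ("DOGE", ["doge", "dogecoin"]), ("XRP", ["xrp", "ripple"]), ("BONK", ["bonk"]),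
     ("WIF", ["wif", "dogwifhat"]), ("PEPE", ["pepe"])] []
    (by intro g hg; simp) (by decide)
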